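-- pv_equiv track=rewrite | github.com/shrutiichandra/database-assignments | A3/q_1.py | doRoundRobin
-- ===== SOURCE A (Python) =====
-- def doRoundRobin(dict_of_list, q,num_inst_list):
-- 	i = 0
-- 	rr_list = []
-- 	maxi = max(num_inst_list)
-- 	while i < maxi:
-- 		for trans_num, trans_list in dict_of_list.items():
-- 			if i < len(trans_list):
-- 				j = i
-- 				while j < i+q and j < len(trans_list):
-- 					rr_list.append((trans_num, trans_list[j]))
-- 					j += 1
-- 		i += q
--
-- 	return rr_list, len(num_inst_list)
-- ===== SOURCE B (Python) =====
-- def doRoundRobin(dict_of_list, q, num_inst_list):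
--     maxi = max(num_inst_list)
--     rr_list = []
--     active = list(dict_of_list.items())
--     i = 0
--     while i < maxi and active:
--         nxt = []
--         for trans_num, trans_list in active:
--             for instr in trans_list[i:i + q]:
--                 rr_list.append((trans_num, instr))
--             if i + q < len(trans_list):
--                 nxt.append((trans_num, trans_list))
--         active = nxt
--         i += q
--     return rr_list, len(num_inst_list)
-- ===== Notes on version B (the rewrite author's own statement) =====
-- stated objective: alternative
-- what changed: B keeps a shrinking list of still-active transactions and slices each one's q-chunk directly, stopping as soon as all are exhausted, instead of A's rescanning every transaction (and re-testing its length with an index-by-index inner loop) on every round up to max(num_inst_list).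
import Mathlib
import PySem

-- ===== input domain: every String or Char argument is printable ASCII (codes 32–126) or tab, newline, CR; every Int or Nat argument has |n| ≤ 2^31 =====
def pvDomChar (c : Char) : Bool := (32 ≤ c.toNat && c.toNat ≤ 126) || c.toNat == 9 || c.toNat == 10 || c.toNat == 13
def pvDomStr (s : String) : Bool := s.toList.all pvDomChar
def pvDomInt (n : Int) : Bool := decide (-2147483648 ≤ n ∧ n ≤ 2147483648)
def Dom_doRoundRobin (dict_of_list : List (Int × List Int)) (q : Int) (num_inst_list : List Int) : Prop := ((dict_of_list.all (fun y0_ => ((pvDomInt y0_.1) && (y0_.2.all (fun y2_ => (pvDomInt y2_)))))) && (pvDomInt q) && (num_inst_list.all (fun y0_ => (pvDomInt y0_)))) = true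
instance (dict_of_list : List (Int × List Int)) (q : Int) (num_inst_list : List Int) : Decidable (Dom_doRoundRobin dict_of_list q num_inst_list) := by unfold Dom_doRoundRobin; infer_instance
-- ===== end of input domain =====

-- B maintains a shrinking list of still-active transactions and slices q-chunks directly,
-- instead of rescanning every transaction each round; objective: alternative algorithm.


-- ===== PORT A =====
-- inner 'while j < i+q and j < len(trans_list)' loop (iq = i+q); trans_list[j] is in range
-- on every admitted input (0 ≤ j), so pyGetD with default 0 is exact there
def pvInnerA (tn : Int) (tl : List Int) (iq : Int) (j : Int)
    (acc : List (Int × Int)) : List (Int × Int) :=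
  if h : j < iq ∧ j < (tl.length : Int) then
    pvInnerA tn tl iq (j + 1) (acc ++ [(tn, PySem.List.pyGetD tl j 0)])
  else acc
termination_by ((tl.length : Int) - j).toNat
decreasing_by omega

-- outer 'while i < maxi' loop; the '0 < q' test only makes the recursion total:
-- with q ≤ 0 and i < maxi the Python diverges (excluded by Pre_)
def pvRoundA (dict : List (Int × List Int)) (q maxi i : Int)
    (acc : List (Int × Int)) : List (Int × Int) :=
  if h : i < maxi then
    let acc' := dict.foldl
      (fun a p => if i < (p.2.length : Int) then pvInnerA p.1 p.2 (i + q) i a else a) acc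
    if h2 : 0 < q then pvRoundA dict q maxi (i + q) acc' else acc'
  else acc
termination_by (maxi - i).toNat
decreasing_by omega

def doRoundRobin (dict_of_list : List (Int × List Int)) (q : Int) (num_inst_list : List Int) : (List (Int × Int)) × Int :=
  -- max(num_inst_list): raises on [], excluded by Pre_
  let maxi := (PySem.List.max? num_inst_list (fun x => x)).getD 0
  (pvRoundA dict_of_list q maxi 0 [], (num_inst_list.length : Int))

-- ===== PORT B =====
-- body of B's 'for trans_num, trans_list in active' loop: extend rr_list with the chunk,
-- keep the transaction for the next round iff it still has instructions beyond i+q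
def pvStepB (i q : Int) (st : List (Int × Int) × List (Int × List Int))
    (p : Int × List Int) : List (Int × Int) × List (Int × List Int) :=
  (st.1 ++ (PySem.List.slice p.2 (some i) (some (i + q))).map (fun x => (p.1, x)),
   if i + q < (p.2.length : Int) then st.2 ++ [p] else st.2)

-- 'while i < maxi and active'; the '0 < q' test only makes the recursion total
def pvLoopB (active : List (Int × List Int)) (q maxi i : Int)
    (acc : List (Int × Int)) : List (Int × Int) :=
  if h : i < maxi ∧ active ≠ [] ∧ 0 < q then
    let st := active.foldl (pvStepB i q) (acc, [])
    pvLoopB st.2 q maxi (i + q) st.1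
  else acc
termination_by (maxi - i).toNat
decreasing_by omega

def doRoundRobin_alt (dict_of_list : List (Int × List Int)) (q : Int) (num_inst_list : List Int) : (List (Int × Int)) × Int :=
  let maxi := (PySem.List.max? num_inst_list (fun x => x)).getD 0
  (pvLoopB dict_of_list q maxi 0 [], (num_inst_list.length : Int))

-- ===== PRECONDITION & SPEC =====
-- Pre_ excludes exactly the inputs where Python A does not return: empty num_inst_list
-- (max([]) raises ValueError) and q ≤ 0 with a positive maximum (the while loop never ends).
def Pre_doRoundRobin (dict_of_list : List (Int × List Int)) (q : Int) (num_inst_list : List Int) : Prop :=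
  num_inst_list ≠ [] ∧ (0 < q ∨ ∀ x ∈ num_inst_list, x ≤ 0)
instance (dict_of_list : List (Int × List Int)) (q : Int) (num_inst_list : List Int) : Decidable (Pre_doRoundRobin dict_of_list q num_inst_list) := by unfold Pre_doRoundRobin; infer_instance

def pvWitness_doRoundRobin : (List (Int × List Int)) × Int × List Int :=
  ([(1, [10, 20, 30]), (2, [40])], 2, [3, 1])

def Spec_doRoundRobin (dict_of_list : List (Int × List Int)) (q : Int) (num_inst_list : List Int) (out : (List (Int × Int)) × Int) : Prop := out = doRoundRobin_alt dict_of_list q num_inst_list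
instance (dict_of_list : List (Int × List Int)) (q : Int) (num_inst_list : List Int) (out : (List (Int × Int)) × Int) : Decidable (Spec_doRoundRobin dict_of_list q num_inst_list out) := by unfold Spec_doRoundRobin; infer_instance

-- ===== CLAIM (what is proved, stated in full; the proofs are below) =====
def Claim_equal_doRoundRobin : Prop := ∀ (dict_of_list : List (Int × List Int)) (q : Int) (num_inst_list : List Int), Dom_doRoundRobin dict_of_list q num_inst_list → Pre_doRoundRobin dict_of_list q num_inst_list → Spec_doRoundRobin dict_of_list q num_inst_list (doRoundRobin dict_of_list q num_inst_list)

-- ===== LEMMAS AND PROOFS =====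

-- the round-i contribution: for each pair, the q-chunk of its list starting at index i
def pvRound (q i : Int) (L : List (Int × List Int)) : List (Int × Int) :=
  L.flatMap (fun p => ((p.2.drop i.toNat).take q.toNat).map (fun x => (p.1, x)))

-- reference schedule both ports are reduced to
def pvSpec (L : List (Int × List Int)) (q maxi i : Int) : List (Int × Int) :=
  if h : i < maxi ∧ 0 < q then pvRound q i L ++ pvSpec L q maxi (i + q) else []
termination_by (maxi - i).toNat
decreasing_by omega

theorem pvInnerA_eq (tn : Int) (tl : List Int) (iq : Int) :
    ∀ (j : Int) (acc : List (Int × Int)), 0 ≤ j →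
      pvInnerA tn tl iq j acc
        = acc ++ ((tl.drop j.toNat).take (iq - j).toNat).map (fun x => (tn, x)) := by
  intro j acc hj
  induction hn : ((tl.length : Int) - j).toNat using Nat.strong_induction_on generalizing j acc with
  | _ n ih =>
    rw [pvInnerA]
    split
    · rename_i h
      rw [ih (((tl.length : Int) - (j+1)).toNat) (by omega) (j+1) _ (by omega) rfl]
      have hlt : j.toNat < tl.length := by omega
      rw [List.drop_eq_getElem_cons hlt]
      have h1 : (j+1).toNat = j.toNat + 1 := by omega
      have h2 : (iq - j).toNat = (iq - (j+1)).toNat + 1 := by omega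
      rw [h1, h2, List.take_succ_cons, List.map_cons,
          PySem.List.pyGetD_eq_getElem tl 0 hj (by omega)]
      simp
    · rename_i h
      push_neg at h
      rcases lt_or_ge j iq with h' | h'
      · have : tl.length ≤ j.toNat := by have := h h'; omega
        rw [List.drop_eq_nil_of_le this]; simp
      · have : (iq - j).toNat = 0 := by omega
        rw [this]; simp

theorem pvRoundA_fold (dict : List (Int × List Int)) (q i : Int) (hi : 0 ≤ i) :
    ∀ acc, dict.foldl
        (fun a p => if i < (p.2.length : Int) then pvInnerA p.1 p.2 (i + q) i a else a) acc
      = acc ++ pvRound q i dict := by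
  induction dict with
  | nil => intro acc; simp [pvRound]
  | cons p t ih =>
    intro acc
    rw [List.foldl_cons, ih]
    unfold pvRound
    rw [List.flatMap_cons]
    by_cases hc : i < (p.2.length : Int)
    · rw [if_pos hc, pvInnerA_eq p.1 p.2 (i+q) i acc hi]
      have : (i + q - i).toNat = q.toNat := by omega
      rw [this, List.append_assoc]
    · rw [if_neg hc]
      have : p.2.length ≤ i.toNat := by omega
      rw [List.drop_eq_nil_of_le this]
      simp

theorem pvRoundA_eq (dict : List (Int × List Int)) (q maxi : Int) :
    ∀ (i : Int) (acc : List (Int × Int)), 0 ≤ i →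
      pvRoundA dict q maxi i acc = acc ++ pvSpec dict q maxi i := by
  intro i acc hi
  induction hn : (maxi - i).toNat using Nat.strong_induction_on generalizing i acc with
  | _ n ih =>
    rw [pvRoundA, pvSpec]
    split
    · rename_i h
      rw [pvRoundA_fold dict q i hi]
      split
      · rename_i h2
        rw [ih ((maxi - (i+q)).toNat) (by omega) (i+q) _ (by omega) rfl,
            dif_pos ⟨h, h2⟩, List.append_assoc]
      · rename_i h2
        rw [dif_neg (by tauto)]
        have hq0 : q.toNat = 0 := by omega
        simp [pvRound, hq0]
    · rename_i h
      rw [dif_neg (by tauto)]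
      simp

theorem pvStepB_fold (q i : Int) (hi : 0 ≤ i) (hq : 0 ≤ q) :
    ∀ (L : List (Int × List Int)) (acc : List (Int × Int)) (nx : List (Int × List Int)),
      L.foldl (pvStepB i q) (acc, nx)
        = (acc ++ pvRound q i L, nx ++ L.filter (fun p => decide (i + q < (p.2.length : Int)))) := by
  intro L
  induction L with
  | nil => intro acc nx; simp [pvRound]
  | cons p t ih =>
    intro acc nx
    have hs : PySem.List.slice p.2 (some i) (some (i + q))
        = (p.2.drop i.toNat).take q.toNat := by
      rw [PySem.List.slice_toNat p.2 hi (by omega)]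
      have : (i + q).toNat - i.toNat = q.toNat := by omega
      rw [this]
    by_cases hc : i + q < (p.2.length : Int)
    · rw [List.foldl_cons,
          show pvStepB i q (acc, nx) p
              = (acc ++ ((p.2.drop i.toNat).take q.toNat).map (fun x => (p.1, x)), nx ++ [p]) from by
            unfold pvStepB; rw [hs, if_pos hc],
          ih]
      simp [pvRound, List.filter_cons, hc, List.append_assoc]
    · rw [List.foldl_cons,
          show pvStepB i q (acc, nx) p
              = (acc ++ ((p.2.drop i.toNat).take q.toNat).map (fun x => (p.1, x)), nx) from by
            unfold pvStepB; rw [hs, if_neg hc],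
          ih]
      simp [pvRound, List.filter_cons, hc, List.append_assoc]

theorem pvRound_filter (q j : Int) (P : Int × List Int → Bool)
    (L : List (Int × List Int)) (hP : ∀ p ∈ L, P p = false → (p.2.length : Int) ≤ j)
    (hj : 0 ≤ j) :
    pvRound q j (L.filter P) = pvRound q j L := by
  induction L with
  | nil => rfl
  | cons p t ih =>
    rw [List.filter_cons]
    unfold pvRound
    by_cases hc : P p = true
    · rw [if_pos hc, List.flatMap_cons, List.flatMap_cons]
      unfold pvRound at ih
      rw [ih (fun x hx hPx => hP x (List.mem_cons_of_mem p hx) hPx)]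
    · rw [if_neg hc, List.flatMap_cons]
      have hlen : (p.2.length : Int) ≤ j := hP p List.mem_cons_self (by simpa using hc)
      have hd : p.2.length ≤ j.toNat := by omega
      rw [List.drop_eq_nil_of_le hd]
      unfold pvRound at ih
      rw [ih (fun x hx hPx => hP x (List.mem_cons_of_mem p hx) hPx)]
      simp

theorem pvSpec_filter (q maxi : Int) (P : Int × List Int → Bool) :
    ∀ (i : Int) (L : List (Int × List Int)),
      (∀ p ∈ L, P p = false → (p.2.length : Int) ≤ i) → 0 ≤ i →
      pvSpec (L.filter P) q maxi i = pvSpec L q maxi i := by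
  intro i
  induction hn : (maxi - i).toNat using Nat.strong_induction_on generalizing i with
  | _ n ih =>
    intro L hP hi
    by_cases h : i < maxi ∧ 0 < q
    · conv_lhs => rw [pvSpec]
      conv_rhs => rw [pvSpec]
      rw [dif_pos h, dif_pos h, pvRound_filter q i P L hP hi,
          ih ((maxi - (i+q)).toNat) (by omega) (i+q) rfl L
            (fun p hp hPp => le_trans (hP p hp hPp) (by omega)) (by omega)]
    · conv_lhs => rw [pvSpec]
      conv_rhs => rw [pvSpec]
      rw [dif_neg h, dif_neg h]

theorem pvSpec_nil (q maxi : Int) : ∀ i, pvSpec ([] : List (Int × List Int)) q maxi i = [] := by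
  intro i
  induction hn : (maxi - i).toNat using Nat.strong_induction_on generalizing i with
  | _ n ih =>
    rw [pvSpec]
    split
    · rename_i h
      rw [ih ((maxi - (i+q)).toNat) (by omega) (i+q) rfl]
      rfl
    · rfl

theorem pvLoopB_eq (q maxi : Int) :
    ∀ (i : Int) (active : List (Int × List Int)) (acc : List (Int × Int)), 0 ≤ i →
      pvLoopB active q maxi i acc = acc ++ pvSpec active q maxi i := by
  intro i
  induction hn : (maxi - i).toNat using Nat.strong_induction_on generalizing i with
  | _ n ih =>
    intro active acc hi
    rw [pvLoopB]
    split
    · rename_i h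
      obtain ⟨h1, h2, h3⟩ := h
      rw [pvStepB_fold q i hi (by omega) active acc []]
      simp only [List.nil_append]
      rw [ih ((maxi - (i+q)).toNat) (by omega) (i+q) rfl _ _ (by omega),
          pvSpec_filter q maxi _ (i+q)
            active (fun p hp hPp => by simpa using hPp) (by omega)]
      conv_rhs => rw [pvSpec]
      rw [dif_pos ⟨h1, h3⟩, List.append_assoc]
    · rename_i h
      rw [pvSpec]
      by_cases hg : i < maxi ∧ 0 < q
      · have ha : active = [] := by tauto
        rw [dif_pos hg, ha]
        simp [pvRound, pvSpec_nil]
      · rw [dif_neg hg]; simp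

-- ===== VERDICT (by name: the statement is the Claim_ definition above) =====
theorem doRoundRobin_spec : Claim_equal_doRoundRobin := by
  intro dict q nil _ _
  unfold Spec_doRoundRobin doRoundRobin doRoundRobin_alt
  simp only [pvRoundA_eq dict q _ 0 [] le_rfl, pvLoopB_eq q _ 0 dict [] le_rfl]
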